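-- pv_equiv track=rewrite | github.com/kkyungyoon/study | programmers_Python/0710_1.py | solution
-- ===== SOURCE A (Python) =====
-- def solution(price, money, count):
--     # price : 놀이기구 이용료
--     # money : 처음 가지고 있던 금액
--     # count : 놀이기구 이용횟수
--     total_price = 0
--
--     for i in range(1, count+1):
--         total_price += i * price
--     money -= total_price
--
--     if money >= 0:
--         return 0
--     else:
--         result = abs(money)
--         # TypeError: Object of type int64 is not JSON serializable
--         # 해결 : 결과를 int로 감싸기
--         return int(result)
-- ===== SOURCE B (Python) =====
-- def solution(price, money, count):
--     total = price * count * (count + 1) // 2 if count > 0 else 0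
--     return max(0, total - money)
-- ===== Notes on version B (the rewrite author's own statement) =====
-- stated objective: faster
-- what changed: Replaces the O(count) accumulation loop with the closed-form arithmetic-series total price*count*(count+1)//2 and expresses the shortfall as max(0, total-money).
import Mathlib
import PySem

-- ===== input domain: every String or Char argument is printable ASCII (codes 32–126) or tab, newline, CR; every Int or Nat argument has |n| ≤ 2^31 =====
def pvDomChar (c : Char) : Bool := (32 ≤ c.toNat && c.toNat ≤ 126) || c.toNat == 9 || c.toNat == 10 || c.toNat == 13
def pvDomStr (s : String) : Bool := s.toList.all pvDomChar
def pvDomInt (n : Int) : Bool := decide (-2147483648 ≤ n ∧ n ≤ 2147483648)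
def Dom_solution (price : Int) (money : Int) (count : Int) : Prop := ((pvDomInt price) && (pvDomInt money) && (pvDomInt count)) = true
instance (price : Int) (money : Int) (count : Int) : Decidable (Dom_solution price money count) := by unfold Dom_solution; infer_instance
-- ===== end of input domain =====

-- B replaces A's O(count) accumulation loop with the closed-form series total (O(1)).

-- ===== PORT A =====
def solution (price : Int) (money : Int) (count : Int) : Int :=
  let total_price : Int := (PySem.List.pyRange 1 (count + 1) 1).foldl (fun acc i => acc + i * price) 0
  let money' := money - total_price
  if money' ≥ 0 then 0 else |money'|

-- ===== PORT B =====
def solution_alt (price : Int) (money : Int) (count : Int) : Int :=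
  let total : Int := if count > 0 then PySem.Int.floordiv (price * count * (count + 1)) 2 else 0
  max 0 (total - money)

-- ===== PRECONDITION & SPEC =====
def Spec_solution (price : Int) (money : Int) (count : Int) (out : Int) : Prop := out = solution_alt price money count
instance (price : Int) (money : Int) (count : Int) (out : Int) : Decidable (Spec_solution price money count out) := by unfold Spec_solution; infer_instance

-- ===== CLAIM (what is proved, stated in full; the proofs are below) =====
def Claim_equal_solution : Prop := ∀ (price : Int) (money : Int) (count : Int), Dom_solution price money count → Spec_solution price money count (solution price money count)

-- ===== LEMMAS AND PROOFS =====

theorem pv_foldl_eq_sum (price c : Int) (l : List Int) :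
    l.foldl (fun acc i => acc + i * price) c = c + (l.map (· * price)).sum := by
  induction l generalizing c with
  | nil => simp
  | cons a t ih => simp [List.foldl, ih]; ring

theorem pv_sum_range (price : Int) (n : Nat) :
    2 * ((PySem.List.pyRange 1 ((n : Int) + 1) 1).map (· * price)).sum
      = price * n * (n + 1) := by
  induction n with
  | zero => simp
  | succ k ih =>
    have h : PySem.List.pyRange 1 ((k : Int) + 1 + 1) 1
        = PySem.List.pyRange 1 ((k : Int) + 1) 1 ++ [(k : Int) + 1] :=
      PySem.List.pyRange_one_succ_right (by omega)
    push_cast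
    rw [h, List.map_append, List.sum_append]
    simp only [List.map_cons, List.map_nil, List.sum_cons, List.sum_nil]
    push_cast at ih ⊢
    ring_nf
    ring_nf at ih
    linarith

theorem pv_if_abs (m s : Int) : (if m - s ≥ 0 then (0:Int) else |m - s|) = max 0 (s - m) := by
  by_cases h : m - s ≥ 0
  · rw [if_pos h, max_eq_left (by omega)]
  · rw [if_neg h, abs_of_neg (by omega), max_eq_right (by omega)]; omega

theorem solution_spec : Claim_equal_solution := by
  unfold Claim_equal_solution Spec_solution solution solution_alt
  intro price money count _
  by_cases hc : count > 0
  · obtain ⟨n, rfl⟩ : ∃ n : Nat, count = (n : Int) := ⟨count.toNat, by omega⟩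
    rw [pv_foldl_eq_sum]
    have hsum := pv_sum_range price n
    have hfd : PySem.Int.floordiv (price * (n : Int) * ((n : Int) + 1)) 2
        = ((PySem.List.pyRange 1 ((n : Int) + 1) 1).map (· * price)).sum := by
      rw [PySem.Int.floordiv_eq_ediv_of_pos (by omega), ← hsum,
        Int.mul_ediv_cancel_left _ (by omega : (2:Int) ≠ 0)]
    simp only [hc, if_true, hfd, zero_add]
    exact pv_if_abs money _
  · rw [PySem.List.pyRange_one_eq_nil (by omega : count + 1 ≤ 1)]
    simp only [List.foldl_nil, hc, if_false]
    exact pv_if_abs money 0
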